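-- pv_equiv track=rewrite | github.com/Axons-glitch/Kodex_DnD | app.py | fits_in_window
-- ===== SOURCE A (Python) =====
-- from typing import Dict, List, Tuple
--
-- def fits_in_window(indices: List[int]) -> bool:
--     if not indices: return False
--     xs = sorted(indices)
--     xs2 = xs + [x+22 for x in xs]
--     k = len(xs)
--     best_span = 99
--     for i in range(len(xs)):
--         span = xs2[i+k-1] - xs2[i]
--         if span < best_span: best_span = span
--     return best_span <= 10
-- ===== SOURCE B (Python) =====
-- def fits_in_window(indices):
--     if not indices:
--         return False
--     xs = sorted(indices)
--     max_gap = xs[0] + 22 - xs[-1]          # wrap-around gap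
--     for a, b in zip(xs, xs[1:]):
--         gap = b - a
--         if gap > max_gap:
--             max_gap = gap
--     return 22 - max_gap <= 10
-- ===== Notes on version B (the rewrite author's own statement) =====
-- stated objective: simpler
-- what changed: Replaces the doubled-array minimal sliding-window scan with a single pass over the sorted list maintaining the maximum circular gap; the minimal enclosing arc is 22 minus that gap, so it returns (22 - max_gap) <= 10.
import Mathlib
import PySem

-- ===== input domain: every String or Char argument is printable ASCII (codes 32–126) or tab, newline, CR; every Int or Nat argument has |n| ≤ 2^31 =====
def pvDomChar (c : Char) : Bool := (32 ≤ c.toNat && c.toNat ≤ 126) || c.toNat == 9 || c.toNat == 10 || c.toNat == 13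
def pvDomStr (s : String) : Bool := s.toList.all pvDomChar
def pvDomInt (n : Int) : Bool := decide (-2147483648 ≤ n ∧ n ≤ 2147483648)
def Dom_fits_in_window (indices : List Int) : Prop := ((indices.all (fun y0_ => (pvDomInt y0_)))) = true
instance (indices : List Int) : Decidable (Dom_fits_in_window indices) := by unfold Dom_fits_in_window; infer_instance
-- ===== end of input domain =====

-- B replaces A's doubled-array minimal-sliding-window scan by a single max-gap pass
-- over the sorted list (the minimal enclosing circular arc is 22 minus the maximal gap);
-- objective: simpler.

-- ===== PORT A =====
def fits_in_window (indices : List Int) : Bool :=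
  if indices.isEmpty then false else
    let xs := PySem.List.sorted indices (fun x => x) false
    let xs2 := xs ++ xs.map (fun x => x + 22)
    let k : Int := xs.length
    -- xs2[i+k-1] and xs2[i] are always in range here, so pyGetD with default 0 is exact
    let best := (PySem.List.pyRange 0 (xs.length : Int) 1).foldl
      (fun best i =>
        let span := PySem.List.pyGetD xs2 (i + k - 1) 0 - PySem.List.pyGetD xs2 i 0
        if span < best then span else best) 99
    decide (best ≤ 10)

-- ===== PORT B =====
def fits_in_window_alt (indices : List Int) : Bool :=
  if indices.isEmpty then false else
    let xs := PySem.List.sorted indices (fun x => x) false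
    -- xs[0] and xs[-1]: xs is nonempty here, so pyGetD with default 0 is exact
    let init := PySem.List.pyGetD xs 0 0 + 22 - PySem.List.pyGetD xs (-1) 0
    let maxGap := (xs.zip xs.tail).foldl
      (fun g p => if p.2 - p.1 > g then p.2 - p.1 else g) init
    decide (22 - maxGap ≤ 10)

-- ===== PRECONDITION & SPEC =====
def Spec_fits_in_window (indices : List Int) (out : Bool) : Prop := out = fits_in_window_alt indices
instance (indices : List Int) (out : Bool) : Decidable (Spec_fits_in_window indices out) := by unfold Spec_fits_in_window; infer_instance

-- ===== CLAIM (what is proved, stated in full; the proofs are below) =====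
def Claim_equal_fits_in_window : Prop := ∀ (indices : List Int), Dom_fits_in_window indices → Spec_fits_in_window indices (fits_in_window indices)

-- ===== LEMMAS AND PROOFS =====

lemma foldl_max_ge_iff {α : Type} (f : α → Int) (c : Int) (l : List α) (init : Int) :
    (c ≤ List.foldl (fun g i => if f i > g then f i else g) init l) ↔
      (c ≤ init ∨ ∃ i ∈ l, c ≤ f i) := by
  induction l generalizing init with
  | nil => simp
  | cons a t ih =>
    simp only [List.foldl_cons, ih, List.mem_cons]
    constructor
    · rintro (h | ⟨i, hi, hfi⟩)
      · split_ifs at h with hlt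
        · exact Or.inr ⟨a, Or.inl rfl, h⟩
        · exact Or.inl h
      · exact Or.inr ⟨i, Or.inr hi, hfi⟩
    · rintro (h | ⟨i, hi | hi, hfi⟩)
      · left; split_ifs with hlt <;> omega
      · subst hi; left; split_ifs with hlt <;> omega
      · exact Or.inr ⟨i, hi, hfi⟩
lemma foldl_min_le_iff {α : Type} (f : α → Int) (c : Int) (l : List α) (init : Int) :
    (List.foldl (fun b i => if f i < b then f i else b) init l ≤ c) ↔
      (init ≤ c ∨ ∃ i ∈ l, f i ≤ c) := by
  induction l generalizing init with
  | nil => simp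
  | cons a t ih =>
    simp only [List.foldl_cons, ih, List.mem_cons]
    constructor
    · rintro (h | ⟨i, hi, hfi⟩)
      · split_ifs at h with hlt
        · exact Or.inr ⟨a, Or.inl rfl, h⟩
        · exact Or.inl h
      · exact Or.inr ⟨i, Or.inr hi, hfi⟩
    · rintro (h | ⟨i, hi | hi, hfi⟩)
      · left; split_ifs with hlt <;> omega
      · subst hi; left; split_ifs with hlt <;> omega
      · exact Or.inr ⟨i, hi, hfi⟩

theorem fits_in_window_eq_alt (indices : List Int) : fits_in_window indices = fits_in_window_alt indices := by
  unfold fits_in_window fits_in_window_alt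
  by_cases hemp : indices.isEmpty
  · simp [hemp]
  · simp only [hemp, if_false, Bool.false_eq_true]
    set ys := PySem.List.sorted indices (fun x => x) false with hys
    have hne : ys ≠ [] := by
      rw [hys, Ne, PySem.List.sorted_eq_nil_iff]
      intro h; rw [h] at hemp; exact hemp rfl
    have hk : 1 ≤ ys.length := List.length_pos_iff.mpr hne
    rw [decide_eq_decide]
    rw [foldl_min_le_iff (fun i => PySem.List.pyGetD (ys ++ ys.map (fun x => x + 22)) (i + ↑ys.length - 1) 0 - PySem.List.pyGetD (ys ++ ys.map (fun x => x + 22)) i 0) 10]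
    have h22 : (22 - List.foldl (fun g p => if p.2 - p.1 > g then p.2 - p.1 else g)
        (PySem.List.pyGetD ys 0 0 + 22 - PySem.List.pyGetD ys (-1) 0) (ys.zip ys.tail) ≤ 10) ↔
        (12 ≤ List.foldl (fun g p => if p.2 - p.1 > g then p.2 - p.1 else g)
        (PySem.List.pyGetD ys 0 0 + 22 - PySem.List.pyGetD ys (-1) 0) (ys.zip ys.tail)) := by omega
    rw [h22, foldl_max_ge_iff (fun p : Int × Int => p.2 - p.1) 12]
    have hgetlo : ∀ (j : Nat) (h : j < ys.length),
        PySem.List.pyGetD (ys ++ ys.map (fun x => x + 22)) (j : Int) 0 = ys[j] := by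
      intro j h
      rw [PySem.List.pyGetD_natCast, List.getD_eq_getElem _ _ (by simp; omega),
        List.getElem_append_left h]
    have hgethi : ∀ (j : Nat) (h1 : ys.length ≤ j) (h2 : j < 2 * ys.length),
        PySem.List.pyGetD (ys ++ ys.map (fun x => x + 22)) (j : Int) 0
          = ys[j - ys.length]'(by omega) + 22 := by
      intro j h1 h2
      rw [PySem.List.pyGetD_natCast, List.getD_eq_getElem _ _ (by simp; omega),
        List.getElem_append_right h1, List.getElem_map]
    have hi0 : PySem.List.pyGetD ys 0 0 = ys[0]'(by omega) := by
      rw [PySem.List.pyGetD_zero, List.getD_eq_getElem _ _ (by omega)]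
    have hi1 : PySem.List.pyGetD ys (-1) 0 = ys[ys.length - 1]'(by omega) := by
      rw [PySem.List.pyGetD_neg_one _ _ hne, List.getLast_eq_getElem]
    have hzip : ∀ p : Int × Int, p ∈ ys.zip ys.tail ↔
        ∃ (m : Nat) (h : m + 1 < ys.length), p = (ys[m]'(by omega), ys[m+1]'h) := by
      intro p
      rw [List.mem_iff_getElem]
      constructor
      · rintro ⟨m, hm, rfl⟩
        rw [List.length_zip, List.length_tail] at hm
        refine ⟨m, by omega, ?_⟩
        rw [List.getElem_zip, List.getElem_tail]
      · rintro ⟨m, hm, rfl⟩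
        refine ⟨m, by rw [List.length_zip, List.length_tail]; omega, ?_⟩
        rw [List.getElem_zip, List.getElem_tail]
    rw [hi0, hi1]
    constructor
    · rintro (h99 | ⟨i, hmem, hle⟩)
      · omega
      · rw [PySem.List.mem_pyRange_one] at hmem
        obtain ⟨h0, hik⟩ := hmem
        by_cases hi0 : i = 0
        · left
          subst hi0
          have e1 : (0:Int) + ↑ys.length - 1 = ((ys.length - 1 : Nat) : Int) := by omega
          rw [e1, hgetlo (ys.length - 1) (by omega)] at hle
          have e2 : PySem.List.pyGetD (ys ++ ys.map (fun x => x + 22)) 0 0 = ys[0]'(by omega) := by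
            have := hgetlo 0 (by omega); simpa using this
          rw [e2] at hle
          omega
        · right
          rcases Int.eq_ofNat_of_zero_le h0 with ⟨j, hj⟩
          subst hj
          have hjk : j < ys.length := by exact_mod_cast hik
          have hj1 : 1 ≤ j := by omega
          have hA : PySem.List.pyGetD (ys ++ ys.map (fun x => x + 22)) ((j : Int) + ↑ys.length - 1) 0
              = ys[j - 1]'(by omega) + 22 := by
            have e1 : (j : Int) + ↑ys.length - 1 = ((j - 1 + ys.length : Nat) : Int) := by omega
            rw [e1, hgethi _ (by omega) (by omega)]
            congr 2
            omega
          have hB : PySem.List.pyGetD (ys ++ ys.map (fun x => x + 22)) (j : Int) 0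
              = ys[j]'hjk := hgetlo j hjk
          rw [hA, hB] at hle
          have eidx : ys[j - 1 + 1]'(by omega) = ys[j]'hjk := by
            congr 1; omega
          refine ⟨(ys[j - 1]'(by omega), ys[j - 1 + 1]'(by omega)),
            (hzip _).mpr ⟨j - 1, by omega, rfl⟩, ?_⟩
          simp only [eidx]
          omega
    · rintro (h12 | ⟨p, hp, hge⟩)
      · refine Or.inr ⟨0, by rw [PySem.List.mem_pyRange_one]; omega, ?_⟩
        have e1 : (0:Int) + ↑ys.length - 1 = ((ys.length - 1 : Nat) : Int) := by omega
        rw [e1, hgetlo (ys.length - 1) (by omega)]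
        have e2 : PySem.List.pyGetD (ys ++ ys.map (fun x => x + 22)) 0 0 = ys[0]'(by omega) := by
          have := hgetlo 0 (by omega); simpa using this
        rw [e2]
        omega
      · rw [hzip] at hp
        obtain ⟨m, hm, rfl⟩ := hp
        refine Or.inr ⟨((m + 1 : Nat) : Int), by rw [PySem.List.mem_pyRange_one]; omega, ?_⟩
        have e1 : ((m + 1 : Nat) : Int) + ↑ys.length - 1 = ((m + ys.length : Nat) : Int) := by omega
        rw [e1, hgethi _ (by omega) (by omega), hgetlo (m+1) (by omega)]
        simp only at hge
        have em : m + ys.length - ys.length = m := by omega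
        have : ys[m + ys.length - ys.length]'(by omega) = ys[m]'(by omega) := by congr 1
        rw [this]
        omega

-- ===== VERDICT (by name: the statement is the Claim_ definition above) =====
theorem fits_in_window_spec : Claim_equal_fits_in_window := by
  intro indices _
  unfold Spec_fits_in_window
  exact fits_in_window_eq_alt indices
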